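-- pv_equiv track=rewrite | github.com/j-kawa/srtt | prefix.py | prefix_matches
-- ===== SOURCE A (Python) =====
-- PREFIX_WILDCHAR = "x"
--
-- def prefix_matches(prefix: str, string: str) -> bool:
--     if len(prefix) != len(string):
--         return False
--     for pc, sc in zip(prefix, string):
--         if pc == PREFIX_WILDCHAR:
--             continue
--         if pc != sc:
--             return False
--     return True
-- ===== SOURCE B (Python) =====
-- PREFIX_WILDCHAR = "x"
--
-- def prefix_matches(prefix: str, string: str) -> bool:
--     # Fill wildcard positions of the prefix with the corresponding characters
--     # of the string, then compare wholesale (zip truncates, so check lengths).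
--     masked = "".join(s if p == PREFIX_WILDCHAR else p for p, s in zip(prefix, string))
--     return len(prefix) == len(string) and masked == string
-- ===== Notes on version B (the rewrite author's own statement) =====
-- stated objective: alternative
-- what changed: Replaces the length-guard plus early-exit character loop with a single pass that substitutes string characters into the wildcard positions of the prefix and decides by one wholesale string comparison.
import Mathlib
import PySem

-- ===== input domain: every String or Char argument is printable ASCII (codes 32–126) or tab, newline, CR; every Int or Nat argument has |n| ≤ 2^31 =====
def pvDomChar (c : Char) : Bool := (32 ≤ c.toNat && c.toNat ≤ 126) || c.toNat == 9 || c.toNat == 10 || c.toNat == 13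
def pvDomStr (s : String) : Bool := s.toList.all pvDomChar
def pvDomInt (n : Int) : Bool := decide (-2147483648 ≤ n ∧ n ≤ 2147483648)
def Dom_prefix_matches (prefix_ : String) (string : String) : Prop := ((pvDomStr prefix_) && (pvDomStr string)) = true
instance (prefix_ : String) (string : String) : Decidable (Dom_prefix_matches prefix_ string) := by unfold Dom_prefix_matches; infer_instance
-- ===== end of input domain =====

-- ===== PORT A =====
-- early-exit loop over zipped characters, as in A
def pvALoop : List (Char × Char) → Bool
  | [] => true
  | (pc, sc) :: rest =>
    if pc == 'x' then pvALoop rest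
    else if pc != sc then false
    else pvALoop rest

def prefix_matches (prefix_ : String) (string : String) : Bool :=
  if PySem.Str.len prefix_ ≠ PySem.Str.len string then false
  else pvALoop (prefix_.toList.zip string.toList)

-- ===== PORT B =====
-- B: substitute string chars into wildcard positions, then one wholesale comparison
def prefix_matches_alt (prefix_ : String) (string : String) : Bool :=
  let masked := String.ofList ((prefix_.toList.zip string.toList).map
    (fun pq => if pq.1 == 'x' then pq.2 else pq.1))
  (PySem.Str.len prefix_ == PySem.Str.len string) && (masked == string)

-- ===== PRECONDITION & SPEC =====
def Spec_prefix_matches (prefix_ : String) (string : String) (out : Bool) : Prop := out = prefix_matches_alt prefix_ string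
instance (prefix_ : String) (string : String) (out : Bool) : Decidable (Spec_prefix_matches prefix_ string out) := by unfold Spec_prefix_matches; infer_instance

-- ===== CLAIM (what is proved, stated in full; the proofs are below) =====
def Claim_equal_prefix_matches : Prop := ∀ (prefix_ : String) (string : String), Dom_prefix_matches prefix_ string → Spec_prefix_matches prefix_ string (prefix_matches prefix_ string)

-- ===== LEMMAS AND PROOFS =====

-- ===== VERDICT (by name: the statement is the Claim_ definition above) =====
theorem pvALoop_eq_masked (lp ls : List Char) (h : lp.length = ls.length) :
    pvALoop (lp.zip ls) =
      decide ((lp.zip ls).map (fun pq => if pq.1 == 'x' then pq.2 else pq.1) = ls) := by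
  induction lp generalizing ls with
  | nil =>
    cases ls with
    | nil => simp [pvALoop]
    | cons c t => simp at h
  | cons pc lp' ih =>
    cases ls with
    | nil => simp at h
    | cons sc ls' =>
      simp only [List.length_cons, Nat.add_right_cancel_iff] at h
      simp only [List.zip_cons_cons, List.map_cons, pvALoop]
      by_cases hx : pc = 'x'
      · simp [hx, ih ls' h]
      · by_cases hs : pc = sc
        · simp [hs, ih ls' h]
        · simp [hx, hs]

theorem pvOfList_beq (l : List Char) (s : String) :
    (String.ofList l == s) = decide (l = s.toList) := by
  by_cases hm : l = s.toList
  · subst hm; simp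
  · simp only [decide_eq_false hm, beq_eq_false_iff_ne, ne_eq, String.ext_iff]
    simpa using hm

theorem prefix_matches_spec : Claim_equal_prefix_matches := by
  intro p s _
  unfold Spec_prefix_matches prefix_matches prefix_matches_alt PySem.Str.len
  dsimp only
  rw [pvOfList_beq]
  by_cases h : p.toList.length = s.toList.length
  · rw [if_neg (by simp [h]), pvALoop_eq_masked _ _ h]
    simp [h]
  · have hl : p.length ≠ s.length := by
      simpa [← String.length_toList] using h
    have hi : (p.length : Int) ≠ (s.length : Int) := by exact_mod_cast hl
    simp [hi]
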